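-- pv_equiv track=rewrite | github.com/carter-yagemann/vmi-unpack | scripts/parse_exports.py | get_split_jumps
-- ===== SOURCE A (Python) =====
-- def get_split_jumps(_imp_by_j):
--     sorted_jumps = sorted(_imp_by_j.keys())
--     split_jumps = []
--     last_jump = sorted_jumps[0]
--     cur_jumps = [last_jump]
--     for jump in sorted_jumps[1:]:
--         if jump == last_jump + 4:
--             cur_jumps.append(jump)
--         else:
--             split_jumps.append(cur_jumps)
--             cur_jumps = [jump]
--         last_jump = jump
--     split_jumps.append(cur_jumps)
--     return split_jumps
-- ===== SOURCE B (Python) =====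
-- def _merge(left, right):
--     # join the two group lists, fusing the boundary groups when they chain by 4
--     if left and right and left[-1] and right[0] and right[0][0] == left[-1][-1] + 4:
--         return left[:-1] + [left[-1] + right[0]] + right[1:]
--     return left + right
--
--
-- def get_split_jumps(_imp_by_j):
--     # divide and conquer: split the sorted jumps in half, group each half,
--     # then merge, fusing the boundary groups when they are 4 apart
--     def go(js):
--         if len(js) <= 1:
--             return [js] if js else []
--         mid = len(js) // 2
--         return _merge(go(js[:mid]), go(js[mid:]))
--     return go(sorted(_imp_by_j.keys()))
-- ===== Notes on version B (the rewrite author's own statement) =====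
-- stated objective: alternative
-- what changed: Replaces A's single left-to-right scan with mutable last/current-run state by a divide-and-conquer grouping: split the sorted jumps in half, group each half recursively, and merge the two group lists, fusing the boundary groups when they chain by 4.
import Mathlib
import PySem

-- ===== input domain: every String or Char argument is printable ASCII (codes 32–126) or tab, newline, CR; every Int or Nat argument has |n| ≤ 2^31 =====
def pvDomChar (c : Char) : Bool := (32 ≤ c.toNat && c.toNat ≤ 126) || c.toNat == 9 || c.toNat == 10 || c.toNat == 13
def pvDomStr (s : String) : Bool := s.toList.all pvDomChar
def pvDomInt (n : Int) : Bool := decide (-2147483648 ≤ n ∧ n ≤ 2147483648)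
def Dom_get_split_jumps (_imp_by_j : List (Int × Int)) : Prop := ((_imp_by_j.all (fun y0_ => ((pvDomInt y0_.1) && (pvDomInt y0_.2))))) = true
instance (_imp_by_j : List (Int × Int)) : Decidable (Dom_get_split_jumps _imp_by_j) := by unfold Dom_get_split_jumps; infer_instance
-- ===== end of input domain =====

-- B groups the sorted jumps by divide and conquer (recursive halving + boundary merge)
-- instead of A's single scan with last/current-run state; same cost class, different algorithm.
-- On the empty dict A raises IndexError (excluded by Pre_); B would return [] there.

-- ===== PORT A =====
-- sorted(_imp_by_j.keys()) (shared prologue of both ports)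
def pvSortedJumps (_imp_by_j : List (Int × Int)) : List Int :=
  PySem.List.sorted (PySem.Dict.ofList _imp_by_j).keys (fun x => x) false

-- the loop body of A: state = (split_jumps, last_jump, cur_jumps)
def pvAStep (st : List (List Int) × Int × List Int) (jump : Int) :
    List (List Int) × Int × List Int :=
  if jump = st.2.1 + 4 then (st.1, jump, st.2.2 ++ [jump])
  else (st.1 ++ [st.2.2], jump, [jump])

def get_split_jumps (_imp_by_j : List (Int × Int)) : List (List Int) :=
  match PySem.List.pyGet? (pvSortedJumps _imp_by_j) 0 with
  | none => []  -- Python raises IndexError here (excluded by Pre_)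
  | some last_jump =>
    let st := (PySem.List.slice (pvSortedJumps _imp_by_j) (some 1) none).foldl pvAStep
      ([], last_jump, [last_jump])
    st.1 ++ [st.2.2]

-- ===== PORT B =====
-- _merge: join two group lists, fusing the boundary groups when they chain by 4
def pvMerge (left right : List (List Int)) : List (List Int) :=
  match left.getLast?, right with
  | some lg, rg :: rrest =>
    match lg.getLast?, rg with
    | some ll, rh :: _ =>
      if rh = ll + 4 then left.dropLast ++ [lg ++ rg] ++ rrest else left ++ right
    | _, _ => left ++ right
  | _, _ => left ++ right

-- go: recursive halving (len(js)//2 on the nonnegative length is Nat division;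
-- the fuel argument only bounds the recursion depth and is never exhausted)
def pvGoF : Nat → List Int → List (List Int)
  | 0, js => if js = [] then [] else [js]
  | fuel + 1, js =>
    if js.length ≤ 1 then (if js = [] then [] else [js])
    else
      let mid := js.length / 2
      pvMerge (pvGoF fuel (PySem.List.slice js none (some (mid : Int))))
              (pvGoF fuel (PySem.List.slice js (some (mid : Int)) none))

def pvGo (js : List Int) : List (List Int) := pvGoF js.length js

def get_split_jumps_alt (_imp_by_j : List (Int × Int)) : List (List Int) :=
  pvGo (pvSortedJumps _imp_by_j)

-- ===== PRECONDITION & SPEC =====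
-- Pre_ excludes only the empty dict, on which A raises IndexError (sorted_jumps[0]).
def Pre_get_split_jumps (_imp_by_j : List (Int × Int)) : Prop := _imp_by_j ≠ []
instance (_imp_by_j : List (Int × Int)) : Decidable (Pre_get_split_jumps _imp_by_j) := by
  unfold Pre_get_split_jumps; infer_instance

def pvWitness_get_split_jumps : (List (Int × Int)) := [(0, 1), (4, 2), (12, 3)]

def Spec_get_split_jumps (_imp_by_j : List (Int × Int)) (out : List (List Int)) : Prop :=
  out = get_split_jumps_alt _imp_by_j
instance (_imp_by_j : List (Int × Int)) (out : List (List Int)) :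
    Decidable (Spec_get_split_jumps _imp_by_j out) := by unfold Spec_get_split_jumps; infer_instance

-- ===== CLAIM (what is proved, stated in full; the proofs are below) =====
def Claim_equal_get_split_jumps : Prop := ∀ (_imp_by_j : List (Int × Int)), Dom_get_split_jumps _imp_by_j → Pre_get_split_jumps _imp_by_j → Spec_get_split_jumps _imp_by_j (get_split_jumps _imp_by_j)

-- ===== LEMMAS AND PROOFS =====

-- the canonical recursive grouping both ports compute
def pvStep (x : Int) (r : List (List Int)) : List (List Int) :=
  match r with
  | (y :: g) :: rest => if y = x + 4 then (x :: y :: g) :: rest else [x] :: (y :: g) :: rest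
  | r => [x] :: r

def pvChunk : List Int → List (List Int)
  | [] => []
  | x :: xs => pvStep x (pvChunk xs)

theorem pvChunk_cons (x : Int) (xs : List Int) : pvChunk (x :: xs) = pvStep x (pvChunk xs) := rfl

theorem pvChunk_shape (x : Int) (xs : List Int) :
    ∃ g gs, pvChunk (x :: xs) = (x :: g) :: gs := by
  induction xs generalizing x with
  | nil => exact ⟨[], [], rfl⟩
  | cons y ys ih =>
    obtain ⟨g, gs, h⟩ := ih y
    rw [pvChunk_cons, h]
    simp only [pvStep]
    split_ifs with hy
    · exact ⟨y :: g, gs, rfl⟩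
    · exact ⟨[], (y :: g) :: gs, rfl⟩

-- A's fold computes pvChunk
theorem pvFoldA (xs : List Int) : ∀ (last : Int) (cur : List Int) (acc : List (List Int))
    (g : List Int) (gs : List (List Int)), pvChunk (last :: xs) = (last :: g) :: gs →
    (let st := xs.foldl pvAStep (acc, last, cur); st.1 ++ [st.2.2]) = acc ++ (cur ++ g) :: gs := by
  induction xs with
  | nil =>
    intro last cur acc g gs h
    rw [pvChunk_cons] at h
    simp only [pvChunk, pvStep] at h
    obtain ⟨rfl, rfl⟩ : g = [] ∧ gs = [] := by
      constructor <;> cases h <;> rfl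
    simp
  | cons y ys ih =>
    intro last cur acc g gs h
    obtain ⟨g', gs', hy⟩ := pvChunk_shape y ys
    rw [pvChunk_cons, hy] at h
    simp only [pvStep] at h
    simp only [List.foldl_cons, pvAStep]
    by_cases hc : y = last + 4
    · rw [if_pos hc] at h
      simp only [List.cons.injEq, true_and] at h
      obtain ⟨rfl, rfl⟩ := h
      rw [if_pos hc]
      have := ih y (cur ++ [y]) acc g' gs' hy
      simpa [List.append_assoc] using this
    · rw [if_neg hc] at h
      simp only [List.cons.injEq, true_and] at h
      obtain ⟨hg, rfl⟩ := h
      rw [if_neg hc]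
      have := ih y [y] (acc ++ [cur]) g' gs' hy
      simp only [← hg]
      simpa [List.append_assoc] using this

-- pvMerge distributes over a leading group when more groups follow
theorem pvMerge_cons (a : List Int) (L R : List (List Int)) (hL : L ≠ []) :
    pvMerge (a :: L) R = a :: pvMerge L R := by
  cases L with
  | nil => exact absurd rfl hL
  | cons b bs =>
    unfold pvMerge
    rw [List.getLast?_cons_cons]
    cases R with
    | nil => cases hg : (b :: bs).getLast? <;> simp
    | cons rg rrest =>
      cases hg : (b :: bs).getLast? with
      | none => simp at hg
      | some lg =>
        cases hll : lg.getLast? with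
        | none => simp [hll]
        | some ll =>
          simp only [hll]
          cases rg with
          | nil => simp
          | cons rh rt =>
            by_cases hif : rh = ll + 4 <;> simp [hif]

-- pvStep commutes with pvMerge (on shaped group lists)
theorem pvStep_pvMerge (x h rh : Int) (g rg : List Int) (gs rgs : List (List Int)) :
    pvStep x (pvMerge ((h :: g) :: gs) ((rh :: rg) :: rgs)) =
      pvMerge (pvStep x ((h :: g) :: gs)) ((rh :: rg) :: rgs) := by
  cases gs with
  | cons g0 gs1 =>
    rw [pvMerge_cons (h :: g) (g0 :: gs1) _ (by simp)]
    by_cases hx : h = x + 4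
    · simp only [pvStep, if_pos hx]
      rw [pvMerge_cons (x :: h :: g) (g0 :: gs1) _ (by simp)]
    · simp only [pvStep, if_neg hx]
      rw [pvMerge_cons [x] ((h :: g) :: g0 :: gs1) _ (by simp),
        pvMerge_cons (h :: g) (g0 :: gs1) _ (by simp)]
  | nil =>
    obtain ⟨ll, hll⟩ : ∃ v, (h :: g).getLast? = some v :=
      Option.isSome_iff_exists.mp (by simp)
    have hxll : (x :: h :: g).getLast? = some ll := by
      rw [List.getLast?_cons_cons]; exact hll
    by_cases hr : rh = ll + 4 <;> by_cases hx : h = x + 4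
    · have hll' := hll; have hxll' := hxll; rw [hx] at hll' hxll'
      simp [pvMerge, pvStep, hr, hx, hll', hxll']
    · simp [pvMerge, pvStep, hr, hx, hll]
    · have hll' := hll; have hxll' := hxll; rw [hx] at hll' hxll'
      simp [pvMerge, pvStep, hr, hx, hll', hxll']
    · simp [pvMerge, pvStep, hr, hx, hll]

-- pvMerge of chunks is the chunk of the concatenation
theorem pvMerge_pvChunk (l r : List Int) (hl : l ≠ []) (hr : r ≠ []) :
    pvMerge (pvChunk l) (pvChunk r) = pvChunk (l ++ r) := by
  obtain ⟨rh0, rt, rfl⟩ := List.exists_cons_of_ne_nil hr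
  obtain ⟨rg, rgs, hcr⟩ := pvChunk_shape rh0 rt
  induction l with
  | nil => exact absurd rfl hl
  | cons a l' ih =>
    cases l' with
    | nil =>
      show pvMerge (pvChunk [a]) (pvChunk (rh0 :: rt)) = pvChunk (a :: rh0 :: rt)
      rw [show pvChunk (a :: rh0 :: rt) = pvStep a (pvChunk (rh0 :: rt)) from rfl, hcr,
        show pvChunk [a] = [[a]] from rfl]
      by_cases hx : rh0 = a + 4 <;> simp [pvMerge, pvStep, hx]
    | cons b l'' =>
      obtain ⟨g', gs', hbl⟩ := pvChunk_shape b l''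
      rw [pvChunk_cons, hbl, hcr, ← pvStep_pvMerge, ← hcr, ← hbl, ih (by simp),
        List.cons_append, pvChunk_cons]
      rfl

-- B's divide and conquer computes pvChunk
theorem pvGoF_eq_pvChunk : ∀ (fuel : Nat) (js : List Int), js.length ≤ fuel →
    pvGoF fuel js = pvChunk js := by
  intro fuel
  induction fuel with
  | zero =>
    intro js h
    obtain rfl : js = [] := List.eq_nil_of_length_eq_zero (Nat.le_zero.mp h)
    rfl
  | succ f ih =>
    intro js h
    rw [pvGoF]
    by_cases h1 : js.length ≤ 1
    · rw [if_pos h1]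
      cases js with
      | nil => rfl
      | cons a t =>
        obtain rfl : t = [] := by
          simpa using List.eq_nil_of_length_eq_zero (by simpa using h1)
        rfl
    · rw [if_neg h1]
      rw [Nat.not_le] at h1
      show pvMerge (pvGoF f (PySem.List.slice js none (some ((js.length / 2 : Nat) : Int))))
          (pvGoF f (PySem.List.slice js (some ((js.length / 2 : Nat) : Int)) none)) = pvChunk js
      rw [PySem.List.slice_to_natCast, PySem.List.slice_from_natCast,
        ih _ (by simp [List.length_take]; omega),
        ih _ (by simp [List.length_drop]; omega),
        pvMerge_pvChunk _ _
          (by apply List.ne_nil_of_length_pos; simp [List.length_take]; omega)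
          (by apply List.ne_nil_of_length_pos; simp [List.length_drop]; omega),
        List.take_append_drop]

-- keys of a nonempty dict are nonempty
theorem pvKeys_ne_nil (d : List (Int × Int)) (h : d ≠ []) :
    (PySem.Dict.ofList d).keys ≠ [] := by
  have hk : (PySem.Dict.ofList d).keys =
      PySem.Set.update (PySem.Dict.empty (κ := Int) (ν := Int)).keys (d.map Prod.fst) := by
    rw [show PySem.Dict.ofList d = d.foldl (fun dd p => dd.insert p.1 p.2) PySem.Dict.empty from rfl]
    exact PySem.Dict.keys_foldl_insert_key d Prod.fst _ _
  obtain ⟨p, ps, rfl⟩ := List.exists_cons_of_ne_nil h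
  intro hnil
  have : p.1 ∈ (PySem.Dict.ofList (p :: ps)).keys := by
    rw [hk]
    exact (PySem.Set.mem_update _ _ _).2 (Or.inr (by simp))
  rw [hnil] at this
  exact absurd this (List.not_mem_nil)

-- ===== VERDICT (by name: the statement is the Claim_ definition above) =====
theorem get_split_jumps_spec : Claim_equal_get_split_jumps := by
  intro d _ hpre
  unfold Spec_get_split_jumps get_split_jumps get_split_jumps_alt pvGo
  have hne : pvSortedJumps d ≠ [] := by
    rw [pvSortedJumps, ne_eq, PySem.List.sorted_eq_nil_iff]
    exact pvKeys_ne_nil d hpre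
  obtain ⟨h, t, hs⟩ := List.exists_cons_of_ne_nil hne
  rw [hs, PySem.List.pyGet?_zero_cons, PySem.List.slice_from_one,
    pvGoF_eq_pvChunk _ _ le_rfl]
  obtain ⟨g, gs, hc⟩ := pvChunk_shape h t
  rw [hc]
  simpa using pvFoldA t h [h] [] g gs hc
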